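-- pv_equiv track=rewrite | github.com/Pug-Verse/Programaci-n | morse/Encriptar.py | encriptacion
-- ===== SOURCE A (Python) =====
-- def encriptacion(msg, MORSE_DICCIONARIO):
--     lista1 = list(MORSE_DICCIONARIO.keys())
--     lista_palabras = msg.split(" ")
--     mensaje_cifrado = list()
--     morse_palabra = ""
--     for i in lista_palabras:
--         for j in i:
--             if j.upper() not in lista1:
--
--                 mensaje_cifrado.clear()
--                 mensaje_cifrado.append(
--                     "No se puede traducir a codigo morse")
--                 return mensaje_cifrado
--             morse_palabra = morse_palabra + MORSE_DICCIONARIO[j.upper()]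
--             morse_palabra = morse_palabra + " "
--         mensaje_cifrado.append(morse_palabra)
--         morse_palabra = ""
--     return mensaje_cifrado
-- ===== SOURCE B (Python) =====
-- def encriptacion(msg, MORSE_DICCIONARIO):
--     palabras = msg.split(" ")
--     if any(c.upper() not in MORSE_DICCIONARIO for p in palabras for c in p):
--         return ["No se puede traducir a codigo morse"]
--     return ["".join(MORSE_DICCIONARIO[c.upper()] + " " for c in p) for p in palabras]
-- ===== Notes on version B (the rewrite author's own statement) =====
-- stated objective: simpler
-- what changed: Replaces A's single interleaved loop (mutable accumulator string, in-loop early return, clear+append of the result list) with two separate passes: a short-circuiting validation `any` over all characters, then a comprehension that builds each encoded word by joining.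
import Mathlib
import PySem

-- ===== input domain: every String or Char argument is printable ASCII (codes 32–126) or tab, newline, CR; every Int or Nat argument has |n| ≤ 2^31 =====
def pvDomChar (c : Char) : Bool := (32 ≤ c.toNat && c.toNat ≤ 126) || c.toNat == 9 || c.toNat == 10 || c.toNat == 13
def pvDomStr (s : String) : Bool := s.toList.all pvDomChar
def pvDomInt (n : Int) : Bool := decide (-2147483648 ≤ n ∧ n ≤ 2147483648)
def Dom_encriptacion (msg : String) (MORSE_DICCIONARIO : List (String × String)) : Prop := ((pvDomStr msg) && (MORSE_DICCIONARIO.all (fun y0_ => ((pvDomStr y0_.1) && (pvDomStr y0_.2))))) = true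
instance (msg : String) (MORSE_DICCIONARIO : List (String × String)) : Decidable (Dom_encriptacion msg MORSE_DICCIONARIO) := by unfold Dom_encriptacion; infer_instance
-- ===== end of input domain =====

-- B separates A's single interleaved loop (mutable accumulator + in-loop early return) into a
-- validation pass over all characters followed by an encoding pass (join over each word); same values.


-- ===== PORT A =====
-- inner 'for j in i' loop: builds morse_palabra; none = the early 'return' on an untranslatable char
def encriptacionWordA (MORSE_DICCIONARIO : List (String × String)) (lista1 : List String) :
    List Char → List Char → Option (List Char)
  | [], morse_palabra => some morse_palabra
  | j :: rest, morse_palabra =>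
    let u := String.ofList [PySem.Chars.upperChar j]
    if lista1.contains u then
      encriptacionWordA MORSE_DICCIONARIO lista1 rest
        (morse_palabra ++ ((PySem.Dict.mk MORSE_DICCIONARIO).getD u "").toList ++ [' '])
    else none

-- outer 'for i in lista_palabras' loop with the accumulating mensaje_cifrado
def encriptacionWordsA (MORSE_DICCIONARIO : List (String × String)) (lista1 : List String) :
    List (List Char) → List String → List String
  | [], mensaje_cifrado => mensaje_cifrado
  | i :: rest, mensaje_cifrado =>
    match encriptacionWordA MORSE_DICCIONARIO lista1 i [] with
    | none => ["No se puede traducir a codigo morse"]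
    | some morse_palabra =>
        encriptacionWordsA MORSE_DICCIONARIO lista1 rest (mensaje_cifrado ++ [String.ofList morse_palabra])

def encriptacion (msg : String) (MORSE_DICCIONARIO : List (String × String)) : List String :=
  let lista1 := (PySem.Dict.mk MORSE_DICCIONARIO).keys
  let lista_palabras := PySem.Chars.splitOn msg.toList [' ']
  encriptacionWordsA MORSE_DICCIONARIO lista1 lista_palabras []

-- ===== PORT B =====
def encriptacion_alt (msg : String) (MORSE_DICCIONARIO : List (String × String)) : List String :=
  let d : PySem.Dict String String := PySem.Dict.mk MORSE_DICCIONARIO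
  let palabras := PySem.Chars.splitOn msg.toList [' ']
  if palabras.any (fun p => p.any (fun c => !(d.contains (String.ofList [PySem.Chars.upperChar c])))) then
    ["No se puede traducir a codigo morse"]
  else
    palabras.map (fun p =>
      String.ofList (p.flatMap (fun c => (d.getD (String.ofList [PySem.Chars.upperChar c]) "").toList ++ [' '])))

-- ===== PRECONDITION & SPEC =====
def Spec_encriptacion (msg : String) (MORSE_DICCIONARIO : List (String × String)) (out : List String) : Prop := out = encriptacion_alt msg MORSE_DICCIONARIO
instance (msg : String) (MORSE_DICCIONARIO : List (String × String)) (out : List String) : Decidable (Spec_encriptacion msg MORSE_DICCIONARIO out) := by unfold Spec_encriptacion; infer_instance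

-- ===== CLAIM (what is proved, stated in full; the proofs are below) =====
def Claim_equal_encriptacion : Prop := ∀ (msg : String) (MORSE_DICCIONARIO : List (String × String)), Dom_encriptacion msg MORSE_DICCIONARIO → Spec_encriptacion msg MORSE_DICCIONARIO (encriptacion msg MORSE_DICCIONARIO)

-- ===== LEMMAS AND PROOFS =====

-- the inner loop equals: all chars translatable → the flat-mapped encoding appended to the accumulator; else none
theorem wordA_eq (M : List (String × String)) (cs acc : List Char) :
    encriptacionWordA M (PySem.Dict.mk M).keys cs acc =
      if cs.all (fun c => (PySem.Dict.mk M).contains (String.ofList [PySem.Chars.upperChar c])) then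
        some (acc ++ cs.flatMap (fun c =>
          ((PySem.Dict.mk M).getD (String.ofList [PySem.Chars.upperChar c]) "").toList ++ [' ']))
      else none := by
  induction cs generalizing acc with
  | nil => simp [encriptacionWordA]
  | cons c rest ih =>
    simp only [encriptacionWordA, List.all_cons, List.flatMap_cons]
    have hc : ((PySem.Dict.mk M).keys).contains (String.ofList [PySem.Chars.upperChar c]) =
        (PySem.Dict.mk M).contains (String.ofList [PySem.Chars.upperChar c]) := by
      rw [Bool.eq_iff_iff]
      simp [PySem.Dict.contains_mk, PySem.Dict.keys_mk, List.any_eq_true, List.mem_map]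
    rw [hc]
    by_cases h : (PySem.Dict.mk M).contains (String.ofList [PySem.Chars.upperChar c]) = true
    · simp only [h, if_pos, Bool.true_and, ih]
      split_ifs <;> simp
    · simp [h]

-- the outer loop equals: any bad char anywhere → the error singleton; else accumulator ++ encoded words
theorem wordsA_eq (M : List (String × String)) (ws : List (List Char)) (acc : List String) :
    encriptacionWordsA M (PySem.Dict.mk M).keys ws acc =
      if ws.any (fun p => p.any (fun c => !((PySem.Dict.mk M).contains (String.ofList [PySem.Chars.upperChar c])))) then
        ["No se puede traducir a codigo morse"]
      else acc ++ ws.map (fun p => String.ofList (p.flatMap (fun c =>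
        ((PySem.Dict.mk M).getD (String.ofList [PySem.Chars.upperChar c]) "").toList ++ [' ']))) := by
  induction ws generalizing acc with
  | nil => simp [encriptacionWordsA]
  | cons w rest ih =>
    simp only [encriptacionWordsA, wordA_eq, List.all_eq_not_any_not, List.any_cons, List.map_cons]
    by_cases hb : (w.any fun c => !(PySem.Dict.mk M).contains (String.ofList [PySem.Chars.upperChar c])) = true
    · simp only [hb, Bool.not_true, Bool.false_eq_true, if_false, Bool.true_or, if_true]
    · have hbf : (w.any fun c => !(PySem.Dict.mk M).contains (String.ofList [PySem.Chars.upperChar c])) = false :=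
        Bool.eq_false_iff.mpr hb
      simp only [hbf, Bool.not_false, if_true, ih, Bool.false_or, List.append_assoc,
        List.singleton_append, List.nil_append]

-- ===== VERDICT (by name: the statement is the Claim_ definition above) =====
theorem encriptacion_spec : Claim_equal_encriptacion := by
  intro msg M _
  show encriptacion msg M = encriptacion_alt msg M
  simp only [encriptacion, encriptacion_alt, wordsA_eq, List.nil_append]
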